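-- pv_equiv track=rewrite | github.com/joshanashakya/dissertation | workspace/dataset/java-python/GeeksForGeeks/1305/A/2.py | calculateAlternateSum
-- ===== SOURCE A (Python) =====
-- def calculateAlternateSum(n):
--
--     if (n <= 0):
--         return 0
--
--     fibo = [0]*(n + 1)
--     fibo[0] = 0
--     fibo[1] = 1
--
--     # Initialize result
--     sum = pow(fibo[0], 2) + pow(fibo[1], 2)
--
--     # Add remaining terms
--     for i in range(2, n+1) :
--         fibo[i] = fibo[i - 1] + fibo[i - 2]
--
--         # For even terms
--         if (i % 2 == 0):
--             sum -= fibo[i]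
--
--         # For odd terms
--         else:
--             sum += fibo[i]
--
--     # Return the alternating sum
--     return sum
-- ===== SOURCE B (Python) =====
-- def _fib(k):
--     # fast-doubling: returns (Fib(k), Fib(k+1))
--     if k == 0:
--         return (0, 1)
--     a, b = _fib(k // 2)
--     c = a * (2 * b - a)
--     d = a * a + b * b
--     if k % 2 == 0:
--         return (c, d)
--     return (d, c + d)
--
--
-- def calculateAlternateSum(n):
--     if n <= 0:
--         return 0
--     f = _fib(n - 1)[0]
--     return 1 - f if n % 2 == 0 else 1 + f
-- ===== Notes on version B (the rewrite author's own statement) =====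
-- stated objective: faster
-- what changed: Replaces the linear Fibonacci table and alternating accumulation loop by a telescoped closed form in a single Fibonacci number computed with fast doubling.
import Mathlib
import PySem

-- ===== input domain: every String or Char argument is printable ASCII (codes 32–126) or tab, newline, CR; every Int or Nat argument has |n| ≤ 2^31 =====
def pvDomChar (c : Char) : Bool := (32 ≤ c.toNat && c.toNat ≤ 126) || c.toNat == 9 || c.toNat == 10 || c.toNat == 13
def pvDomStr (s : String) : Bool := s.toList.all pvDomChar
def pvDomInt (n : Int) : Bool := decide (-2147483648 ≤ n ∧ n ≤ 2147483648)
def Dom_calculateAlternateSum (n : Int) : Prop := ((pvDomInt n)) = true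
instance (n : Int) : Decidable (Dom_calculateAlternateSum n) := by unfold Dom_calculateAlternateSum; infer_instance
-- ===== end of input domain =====

-- B replaces A's linear Fibonacci-table loop by the telescoped closed form of the
-- alternating Fibonacci sum, computed with fast-doubling Fibonacci.

-- ===== PORT A =====
-- one iteration of A's 'for i in range(2, n+1)' loop; state = (fibo, sum)
def stepA (st : List Int × Int) (i : Int) : List Int × Int :=
  let fibo := PySem.List.pySetD st.1 i
      (PySem.List.pyGetD st.1 (i - 1) 0 + PySem.List.pyGetD st.1 (i - 2) 0)
  if i % 2 = 0 then (fibo, st.2 - PySem.List.pyGetD fibo i 0)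
  else (fibo, st.2 + PySem.List.pyGetD fibo i 0)

def calculateAlternateSum (n : Int) : Int :=
  if n ≤ 0 then 0
  else
    let fibo : List Int := List.replicate (n + 1).toNat 0
    let fibo := PySem.List.pySetD fibo 0 0
    let fibo := PySem.List.pySetD fibo 1 1
    let sum : Int := (PySem.List.pyGetD fibo 0 0) ^ 2 + (PySem.List.pyGetD fibo 1 0) ^ 2
    ((PySem.List.pyRange 2 (n + 1) 1).foldl stepA (fibo, sum)).2

-- ===== PORT B =====
-- fast doubling: fastFib k = (Fib k, Fib (k+1))
def fastFib : Nat → Int × Int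
  | 0 => (0, 1)
  | (k + 1) =>
    let p := fastFib ((k + 1) / 2)
    let a := p.1
    let b := p.2
    let c := a * (2 * b - a)
    let d := a * a + b * b
    if (k + 1) % 2 = 0 then (c, d) else (d, c + d)
decreasing_by omega

def calculateAlternateSum_alt (n : Int) : Int :=
  if n ≤ 0 then 0
  else
    let f := (fastFib (n - 1).toNat).1
    if n % 2 = 0 then 1 - f else 1 + f

-- ===== PRECONDITION & SPEC =====
def Spec_calculateAlternateSum (n : Int) (out : Int) : Prop := out = calculateAlternateSum_alt n
instance (n : Int) (out : Int) : Decidable (Spec_calculateAlternateSum n out) := by unfold Spec_calculateAlternateSum; infer_instance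

-- ===== CLAIM (what is proved, stated in full; the proofs are below) =====
def Claim_equal_calculateAlternateSum : Prop := ∀ (n : Int), Dom_calculateAlternateSum n → Spec_calculateAlternateSum n (calculateAlternateSum n)

-- ===== LEMMAS AND PROOFS =====

-- mathematical Fibonacci over Int
def mfib (k : Nat) : Int := (Nat.fib k : Int)

-- the closed-form value A's sum equals after looping up to m (for m ≥ 1)
def Tval (m : Int) : Int :=
  if m % 2 = 0 then 1 - mfib (m - 1).toNat else 1 + mfib (m - 1).toNat

lemma mfib_add_two (k : Nat) : mfib k + mfib (k + 1) = mfib (k + 2) := by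
  simp only [mfib]
  exact_mod_cast (Nat.fib_add_two (n := k)).symm

lemma fastFib_eq (k : Nat) : fastFib k = (mfib k, mfib (k + 1)) := by
  induction k using Nat.strong_induction_on with
  | _ k ih =>
    match k with
    | 0 => simp [fastFib, mfib]
    | (k + 1) =>
      rw [fastFib, ih ((k + 1) / 2) (by omega)]
      rcases Nat.even_or_odd (k + 1) with h | h
      · obtain ⟨m, hm⟩ := h
        have h2 : (k + 1) / 2 = m := by omega
        have hmod : (k + 1) % 2 = 0 := by omega
        simp only [h2, hmod]
        have e1 : mfib (k + 1) = mfib m * (2 * mfib (m + 1) - mfib m) := by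
          have hle : Nat.fib m ≤ 2 * Nat.fib (m + 1) :=
            le_trans (Nat.fib_le_fib_succ) (by omega)
          have := Nat.fib_two_mul m
          simp only [mfib]
          rw [show k + 1 = 2 * m by omega, this]
          push_cast [hle]; ring
        have e2 : mfib (k + 1 + 1) = mfib m * mfib m + mfib (m + 1) * mfib (m + 1) := by
          have := Nat.fib_two_mul_add_one m
          simp only [mfib]
          rw [show k + 1 + 1 = 2 * m + 1 by omega, this]
          push_cast; ring
        simp [e1, e2]
      · obtain ⟨m, hm⟩ := h
        have h2 : (k + 1) / 2 = m := by omega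
        have hmod : ¬ ((k + 1) % 2 = 0) := by omega
        simp only [h2, if_neg hmod]
        have e1 : mfib (k + 1) = mfib m * mfib m + mfib (m + 1) * mfib (m + 1) := by
          have := Nat.fib_two_mul_add_one m
          simp only [mfib]
          rw [show k + 1 = 2 * m + 1 by omega, this]
          push_cast; ring
        have e2 : mfib (k + 1 + 1) = mfib m * (2 * mfib (m + 1) - mfib m) + (mfib m * mfib m + mfib (m + 1) * mfib (m + 1)) := by
          have hle : Nat.fib m ≤ 2 * Nat.fib (m + 1) :=
            le_trans (Nat.fib_le_fib_succ) (by omega)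
          have hA := Nat.fib_two_mul m
          have hB := Nat.fib_two_mul_add_one m
          have : Nat.fib (2 * m + 2) = Nat.fib (2 * m) + Nat.fib (2 * m + 1) := by
            rw [Nat.fib_add_two]
          simp only [mfib]
          rw [show k + 1 + 1 = 2 * m + 2 by omega, this, hA, hB]
          push_cast [hle]; ring
        simp [e1, e2]

-- reading a set cell (Int indices in range)
lemma pyGetD_pySetD_int (xs : List Int) (i j v d : Int)
    (hi0 : 0 ≤ i) (_hi : i < (xs.length : Int)) (hj0 : 0 ≤ j) (hj : j < (xs.length : Int)) :
    PySem.List.pyGetD (PySem.List.pySetD xs i v) j d =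
      if j = i then v else PySem.List.pyGetD xs j d := by
  rw [PySem.List.pySetD_of_nonneg xs v hi0]
  rw [PySem.List.pyGetD_eq_getElem _ d hj0 (by simpa using hj)]
  rw [PySem.List.pyGetD_eq_getElem xs d hj0 (by simpa using hj)]
  rw [List.getElem_set]
  split_ifs with h1 h2 h2
  · rfl
  · exact absurd (by omega) h2
  · exact absurd (by omega : i.toNat = j.toNat) h1
  · rfl

lemma Tval_step (a : Int) (ha : 2 ≤ a) :
    Tval a = Tval (a - 1) + (if a % 2 = 0 then -(mfib a.toNat) else mfib a.toNat) := by
  have hfib : mfib (a - 2).toNat + mfib (a - 1).toNat = mfib a.toNat := by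
    have h1 : (a - 1).toNat = (a - 2).toNat + 1 := by omega
    have h2 : a.toNat = (a - 2).toNat + 2 := by omega
    rw [h1, h2, mfib_add_two]
  have e1 : a - 1 - 1 = a - 2 := by ring
  rcases Int.emod_two_eq_zero_or_one a with h | h
  · rw [Tval, Tval, e1, if_pos h, if_neg (by omega : ¬ (a - 1) % 2 = 0), if_pos h]
    omega
  · rw [Tval, Tval, e1, if_neg (by omega : ¬ a % 2 = 0),
      if_pos (by omega : (a - 1) % 2 = 0), if_neg (by omega : ¬ a % 2 = 0)]
    omega

-- the loop invariant: folding stepA over range(a, a+k) turns Tval (a-1) into Tval (a+k-1)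
lemma loopA (k : Nat) : ∀ (a : Int) (fibo : List Int) (sum : Int),
    2 ≤ a → a + k ≤ (fibo.length : Int) →
    PySem.List.pyGetD fibo (a - 2) 0 = mfib (a - 2).toNat →
    PySem.List.pyGetD fibo (a - 1) 0 = mfib (a - 1).toNat →
    sum = Tval (a - 1) →
    ((PySem.List.pyRange a (a + k) 1).foldl stepA (fibo, sum)).2 = Tval (a + k - 1) := by
  induction k with
  | zero =>
    intro a fibo sum _ _ _ _ hsum
    simp [PySem.List.pyRange_one_eq_nil (le_refl a), hsum]
  | succ k ih =>
    intro a fibo sum ha hlen h2 h1 hsum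
    have hlt : a < a + (k + 1 : Nat) := by push_cast; omega
    rw [PySem.List.pyRange_one_cons hlt]
    simp only [List.foldl_cons]
    have hlenI : a + 1 + (k : Int) ≤ (fibo.length : Int) := by push_cast at hlen ⊢; omega
    have haL : a < (fibo.length : Int) := by push_cast at hlen ⊢; omega
    have ha0 : (0 : Int) ≤ a := by omega
    have hfv : PySem.List.pyGetD fibo (a - 1) 0 + PySem.List.pyGetD fibo (a - 2) 0 = mfib a.toNat := by
      rw [h1, h2]
      have h1' : (a - 1).toNat = (a - 2).toNat + 1 := by omega
      have h2' : a.toNat = (a - 2).toNat + 2 := by omega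
      rw [h1', h2', add_comm, mfib_add_two]
    set v := PySem.List.pyGetD fibo (a - 1) 0 + PySem.List.pyGetD fibo (a - 2) 0 with hv
    have hget_a : PySem.List.pyGetD (PySem.List.pySetD fibo a v) a 0 = mfib a.toNat := by
      rw [pyGetD_pySetD_int fibo a a v 0 ha0 haL ha0 haL, if_pos rfl, hfv]
    have hget_prev : PySem.List.pyGetD (PySem.List.pySetD fibo a v) (a - 1) 0 = mfib (a - 1).toNat := by
      rw [pyGetD_pySetD_int fibo a (a - 1) v 0 ha0 haL (by omega) (by omega),
        if_neg (by omega), h1]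
    have hstep : stepA (fibo, sum) a =
        (PySem.List.pySetD fibo a v,
          Tval (a - 1) + (if a % 2 = 0 then -(mfib a.toNat) else mfib a.toNat)) := by
      simp only [stepA, ← hv, hsum]
      split_ifs with h
      · simp [hget_a]; ring
      · simp [hget_a]
    rw [hstep]
    have := ih (a + 1) (PySem.List.pySetD fibo a v)
      (Tval (a - 1) + (if a % 2 = 0 then -(mfib a.toNat) else mfib a.toNat))
      (by omega)
      (by rw [PySem.List.length_pySetD]; exact hlenI)
      (by simpa [show a + 1 - 2 = a - 1 from by ring] using hget_prev)
      (by simpa [show a + 1 - 1 = a from by ring] using hget_a)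
      (by rw [show a + 1 - 1 = a from by ring, Tval_step a ha])
    push_cast at this ⊢
    rw [show a + ((k : Int) + 1) = a + 1 + (k : Int) from by ring]
    exact this

-- ===== VERDICT (by name: the statement is the Claim_ definition above) =====
theorem calculateAlternateSum_spec : Claim_equal_calculateAlternateSum := by
  intro n _
  unfold Spec_calculateAlternateSum calculateAlternateSum calculateAlternateSum_alt
  by_cases hn : n ≤ 0
  · simp [hn]
  · have hn1 : 1 ≤ n := by omega
    simp only [if_neg hn]
    set L := (n + 1).toNat with hL
    have hL2 : 2 ≤ L := by omega
    set fibo0 := PySem.List.pySetD (PySem.List.pySetD (List.replicate L (0 : Int)) 0 0) 1 1 with hf0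
    have hlen0 : fibo0.length = L := by
      simp [hf0, PySem.List.length_pySetD]
    have hg0 : PySem.List.pyGetD fibo0 0 0 = 0 := by
      rw [hf0]
      rw [pyGetD_pySetD_int _ 1 0 1 0 (by omega) (by simp [PySem.List.length_pySetD]; omega) (by omega) (by simp [PySem.List.length_pySetD]; omega)]
      rw [if_neg (by omega)]
      rw [pyGetD_pySetD_int _ 0 0 0 0 (by omega) (by simp; omega) (by omega) (by simp; omega)]
      simp
    have hg1 : PySem.List.pyGetD fibo0 1 0 = 1 := by
      rw [hf0]
      rw [pyGetD_pySetD_int _ 1 1 1 0 (by omega) (by simp [PySem.List.length_pySetD]; omega) (by omega) (by simp [PySem.List.length_pySetD]; omega)]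
      simp
    have hsum0 : (PySem.List.pyGetD fibo0 0 0) ^ 2 + (PySem.List.pyGetD fibo0 1 0) ^ 2 = Tval 1 := by
      rw [hg0, hg1]; simp [Tval, mfib]
    have hrange : (2 : Int) + ((n - 1).toNat : Int) = n + 1 := by omega
    have hloop := loopA (n - 1).toNat 2 fibo0 ((PySem.List.pyGetD fibo0 0 0) ^ 2 + (PySem.List.pyGetD fibo0 1 0) ^ 2)
      (by omega)
      (by rw [hlen0]; omega)
      (by simpa using hg0)
      (by simpa using hg1)
      (by simpa using hsum0)
    rw [hrange] at hloop
    rw [hloop]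
    rw [fastFib_eq]
    simp only [Tval]
    rw [show n + 1 - 1 = n from by ring]
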